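-- pv_equiv track=rewrite | github.com/hanafa01/fcs57-python | fcs59/python/special-rearrangment.py | special_rearrangement
-- ===== SOURCE A (Python) =====
-- def special_rearrangement(nums):
--     l_even = []
--     l_odd = []
--
--     for x in nums:
--         if x % 2 == 0:
--             l_even.append(x)
--         else:
--             l_odd.append(x)
--
--     return l_even+l_odd
-- ===== SOURCE B (Python) =====
-- def special_rearrangement(nums):
--     # Stable sort by parity: evens (key False) before odds (key True),
--     # original order preserved within each group.
--     return sorted(nums, key=lambda x: x % 2 != 0)
-- ===== Notes on version B (the rewrite author's own statement) =====
-- stated objective: idiomatic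
-- what changed: Replaces the explicit two-accumulator partition loop and concatenation with a single stable sort keyed by the boolean x % 2 != 0, which groups evens before odds while preserving each group's order.
import Mathlib
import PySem

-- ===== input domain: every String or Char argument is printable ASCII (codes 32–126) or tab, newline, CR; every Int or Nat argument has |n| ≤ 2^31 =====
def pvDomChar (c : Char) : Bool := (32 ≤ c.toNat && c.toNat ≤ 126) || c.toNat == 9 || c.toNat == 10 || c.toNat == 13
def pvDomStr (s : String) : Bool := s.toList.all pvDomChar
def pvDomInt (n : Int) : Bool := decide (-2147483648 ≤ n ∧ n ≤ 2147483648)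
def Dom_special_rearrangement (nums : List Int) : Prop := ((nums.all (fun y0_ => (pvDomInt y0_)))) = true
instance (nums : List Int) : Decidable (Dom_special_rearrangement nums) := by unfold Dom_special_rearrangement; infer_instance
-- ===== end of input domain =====

-- B replaces the two-accumulator partition loop with a stable sort keyed by parity (idiomatic; same return value).


-- ===== PORT A =====
-- literal transliteration: one loop appending to l_even / l_odd, then l_even + l_odd
def special_rearrangement (nums : List Int) : List Int :=
  let p := nums.foldl
    (fun (acc : List Int × List Int) x =>
      if PySem.Int.mod x 2 = 0 then (acc.1 ++ [x], acc.2) else (acc.1, acc.2 ++ [x]))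
    ([], [])
  p.1 ++ p.2

-- ===== PORT B =====
-- sorted(nums, key=lambda x: x % 2 != 0): stable sort by the boolean parity key
def special_rearrangement_alt (nums : List Int) : List Int :=
  PySem.List.sorted nums (fun x => PySem.Int.mod x 2 != 0) false

-- ===== PRECONDITION & SPEC =====
def Spec_special_rearrangement (nums : List Int) (out : List Int) : Prop := out = special_rearrangement_alt nums
instance (nums : List Int) (out : List Int) : Decidable (Spec_special_rearrangement nums out) := by unfold Spec_special_rearrangement; infer_instance

-- ===== CLAIM (what is proved, stated in full; the proofs are below) =====
def Claim_equal_special_rearrangement : Prop := ∀ (nums : List Int), Dom_special_rearrangement nums → Spec_special_rearrangement nums (special_rearrangement nums)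

-- ===== LEMMAS AND PROOFS =====

-- Inserting x into a list of the shape evens ++ odds (key false / key true) keeps that shape:
-- a key-true x goes to the very end, a key-false x right before the key-true block (stability).
lemma insertBy_split (k : Int → Bool) (x : Int) (ev od : List Int)
    (hev : ∀ y ∈ ev, k y = false) (hod : ∀ y ∈ od, k y = true) :
    PySem.List.insertBy (fun a b => decide (k a < k b)) x (ev ++ od)
      = if k x then ev ++ od ++ [x] else ev ++ x :: od := by
  induction ev with
  | nil =>
    induction od with
    | nil => cases hx : k x <;> simp [PySem.List.insertBy]
    | cons y ys ih =>
      have hy : k y = true := hod y (by simp)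
      have ih' := ih (fun z hz => hod z (by simp [hz]))
      cases hx : k x
      · simp [PySem.List.insertBy, hy, hx, Bool.lt_iff]
      · rw [hx, if_pos rfl] at ih'
        simp [PySem.List.insertBy, hy, hx, Bool.lt_iff]
        simpa [Bool.lt_iff] using ih'
  | cons e es ih =>
    have he : k e = false := hev e (by simp)
    have ih' := ih (fun z hz => hev z (by simp [hz]))
    cases hx : k x <;>
      simp_all [PySem.List.insertBy, Bool.lt_iff]

-- Loop invariant: A's pair of accumulators, concatenated, tracks B's insertion-sort accumulator.
lemma loop_eq (nums : List Int) : ∀ (ev od : List Int),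
    (∀ y ∈ ev, (PySem.Int.mod y 2 != 0) = false) →
    (∀ y ∈ od, (PySem.Int.mod y 2 != 0) = true) →
    (nums.foldl
      (fun (acc : List Int × List Int) x =>
        if PySem.Int.mod x 2 = 0 then (acc.1 ++ [x], acc.2) else (acc.1, acc.2 ++ [x]))
      (ev, od)).1 ++
    (nums.foldl
      (fun (acc : List Int × List Int) x =>
        if PySem.Int.mod x 2 = 0 then (acc.1 ++ [x], acc.2) else (acc.1, acc.2 ++ [x]))
      (ev, od)).2
    = nums.foldl
        (fun acc x => PySem.List.insertBy
          (fun a b => decide ((PySem.Int.mod a 2 != 0) < (PySem.Int.mod b 2 != 0))) x acc)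
        (ev ++ od) := by
  induction nums with
  | nil => intro ev od _ _; rfl
  | cons x xs ih =>
    intro ev od hev hod
    by_cases hx : PySem.Int.mod x 2 = 0
    · have hkx : (PySem.Int.mod x 2 != 0) = false := by rw [hx]; rfl
      rw [List.foldl_cons, List.foldl_cons, if_pos hx,
        insertBy_split (fun y => PySem.Int.mod y 2 != 0) x ev od hev hod, hkx]
      simp only [Bool.false_eq_true, if_false]
      have := ih (ev ++ [x]) od
        (by intro y hy; rcases List.mem_append.mp hy with h | h
            · exact hev y h
            · simp only [List.mem_singleton] at h; rw [h]; exact hkx)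
        hod
      simpa [List.append_assoc] using this
    · have hkx : (PySem.Int.mod x 2 != 0) = true := by
        simpa [bne] using hx
      rw [List.foldl_cons, List.foldl_cons, if_neg hx,
        insertBy_split (fun y => PySem.Int.mod y 2 != 0) x ev od hev hod, hkx]
      simp only [if_true]
      have := ih ev (od ++ [x]) hev
        (by intro y hy; rcases List.mem_append.mp hy with h | h
            · exact hod y h
            · simp only [List.mem_singleton] at h; rw [h]; exact hkx)
      simpa [List.append_assoc] using this

-- ===== VERDICT (by name: the statement is the Claim_ definition above) =====
theorem special_rearrangement_spec : Claim_equal_special_rearrangement := by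
  intro nums _
  show special_rearrangement nums = special_rearrangement_alt nums
  have h := loop_eq nums [] [] (by simp) (by simp)
  simpa [special_rearrangement, special_rearrangement_alt, PySem.List.sorted] using h
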